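-- pv_equiv track=rewrite | github.com/e-goldman/order_verifier | verify_orders.py | verify_orders
-- ===== SOURCE A (Python) =====
-- def verify_orders(register1, register2, served_orders):
--
--   # returns False if there are any excess completed orders or missing orders
-- 	if len(served_orders) != len(register1) + len(register2):
-- 		return False
--
-- 	r1_index = 0
-- 	r2_index = 0
--
--   # returns False if an element in served_orders is not the "next" element in register1 or register2
--   # else increments pointer for relevent register
-- 	for order in served_orders:
-- 		if r1_index < len(register1) and order == register1[r1_index]:
-- 			r1_index += 1
-- 		elif r2_index < len(register2) and order == register2[r2_index]:
-- 			r2_index += 1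
-- 		else:
-- 			return False
--
--   # returns True if no above failure conditions are found
-- 	return True
-- ===== SOURCE B (Python) =====
-- def verify_orders(register1, register2, served_orders):
--     if len(served_orders) != len(register1) + len(register2):
--         return False
--     # pass 1: greedily consume the register1 subsequence; collect the leftovers
--     remaining = []
--     i = 0
--     for order in served_orders:
--         if i < len(register1) and order == register1[i]:
--             i += 1
--         else:
--             remaining.append(order)
--     # pass 2: leftovers must be exactly register2, in order
--     return remaining == list(register2)
-- ===== Notes on version B (the rewrite author's own statement) =====
-- stated objective: alternative
-- what changed: Replaces the interleaved two-pointer branching with a register1-subsequence scan that collects leftovers, followed by a plain equality check of the leftovers against register2.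
import Mathlib
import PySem

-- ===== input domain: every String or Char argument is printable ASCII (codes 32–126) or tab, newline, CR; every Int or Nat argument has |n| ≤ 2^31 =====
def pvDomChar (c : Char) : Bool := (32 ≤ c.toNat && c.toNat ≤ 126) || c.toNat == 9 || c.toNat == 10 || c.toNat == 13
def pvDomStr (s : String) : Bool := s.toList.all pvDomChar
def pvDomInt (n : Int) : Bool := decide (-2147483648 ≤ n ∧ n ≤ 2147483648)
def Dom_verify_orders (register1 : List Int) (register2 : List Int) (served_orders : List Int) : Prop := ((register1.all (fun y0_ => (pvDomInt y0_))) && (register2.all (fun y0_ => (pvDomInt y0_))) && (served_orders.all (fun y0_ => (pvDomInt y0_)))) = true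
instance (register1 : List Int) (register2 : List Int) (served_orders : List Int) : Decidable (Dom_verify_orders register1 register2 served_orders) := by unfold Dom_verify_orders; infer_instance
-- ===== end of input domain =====

-- B replaces A's interleaved two-pointer loop by a register1-subsequence scan collecting
-- leftovers, then compares the leftovers to register2; return values agree on all inputs.
-- ===== PORT A =====
-- the for-loop of A: state = (r1_index, r2_index), early return False
def verifyLoopA (register1 : List Int) (register2 : List Int) : List Int → Nat → Nat → Bool
  | [], _, _ => true
  | order :: rest, r1i, r2i =>
    if r1i < register1.length ∧ register1[r1i]? = some order then
      verifyLoopA register1 register2 rest (r1i + 1) r2i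
    else if r2i < register2.length ∧ register2[r2i]? = some order then
      verifyLoopA register1 register2 rest r1i (r2i + 1)
    else
      false

def verify_orders (register1 : List Int) (register2 : List Int) (served_orders : List Int) : Bool :=
  if served_orders.length ≠ register1.length + register2.length then false
  else verifyLoopA register1 register2 served_orders 0 0

-- ===== PORT B =====
-- pass 1 of B: leftovers of served after greedily consuming the register1 subsequence
def leftovers (register1 : List Int) : List Int → Nat → List Int
  | [], _ => []
  | order :: rest, i =>
    if i < register1.length ∧ register1[i]? = some order then
      leftovers register1 rest (i + 1)
    else
      order :: leftovers register1 rest i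

def verify_orders_alt (register1 : List Int) (register2 : List Int) (served_orders : List Int) : Bool :=
  if served_orders.length ≠ register1.length + register2.length then false
  else leftovers register1 served_orders 0 == register2

-- ===== PRECONDITION & SPEC =====
def Spec_verify_orders (register1 : List Int) (register2 : List Int) (served_orders : List Int) (out : Bool) : Prop := out = verify_orders_alt register1 register2 served_orders
instance (register1 : List Int) (register2 : List Int) (served_orders : List Int) (out : Bool) : Decidable (Spec_verify_orders register1 register2 served_orders out) := by unfold Spec_verify_orders; infer_instance

-- ===== CLAIM (what is proved, stated in full; the proofs are below) =====
def Claim_equal_verify_orders : Prop := ∀ (register1 : List Int) (register2 : List Int) (served_orders : List Int), Dom_verify_orders register1 register2 served_orders → Spec_verify_orders register1 register2 served_orders (verify_orders register1 register2 served_orders)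

-- ===== LEMMAS AND PROOFS =====

-- Loop invariant: with the length budget balanced, A's loop succeeds exactly when
-- the leftovers of the register1-scan equal the unserved tail of register2.
lemma loopA_eq_leftovers (register1 register2 : List Int) :
    ∀ (served : List Int) (i j : Nat), i ≤ register1.length → j ≤ register2.length →
    served.length + i + j = register1.length + register2.length →
    verifyLoopA register1 register2 served i j =
      (leftovers register1 served i == register2.drop j) := by
  intro served
  induction served with
  | nil =>
    intro i j hi hj hlen
    have hj' : j = register2.length := by simp at hlen; omega
    simp [verifyLoopA, leftovers, hj', List.drop_length]
  | cons order rest ih =>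
    intro i j hi hj hlen
    simp only [List.length_cons] at hlen
    by_cases h1 : i < register1.length ∧ register1[i]? = some order
    · rw [verifyLoopA, if_pos h1, leftovers, if_pos h1]
      exact ih (i+1) j (by omega) hj (by omega)
    · rw [verifyLoopA, if_neg h1, leftovers, if_neg h1]
      by_cases h2 : j < register2.length ∧ register2[j]? = some order
      · rw [if_pos h2]
        have hdrop : register2.drop j = order :: register2.drop (j+1) := by
          rw [List.drop_eq_getElem_cons h2.1]
          have : register2[j] = order := by
            have := h2.2; simpa [List.getElem?_eq_getElem h2.1] using this
          rw [this]
        rw [hdrop, ih i (j+1) hi (by omega) (by omega)]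
        simp
      · rw [if_neg h2]
        rcases Nat.lt_or_ge j register2.length with hlt | hge
        · have hne : register2[j] ≠ order := by
            intro he
            exact h2 ⟨hlt, by simp [List.getElem?_eq_getElem hlt, he]⟩
          have hnc : order :: leftovers register1 rest i ≠ register2.drop j := by
            rw [List.drop_eq_getElem_cons hlt]
            intro hc
            injection hc with hh _
            exact hne hh.symm
          simp [hnc]
        · rw [List.drop_of_length_le hge]
          simp

-- ===== VERDICT (by name: the statement is the Claim_ definition above) =====
theorem verify_orders_spec : Claim_equal_verify_orders := by
  intro register1 register2 served_orders _
  unfold Spec_verify_orders verify_orders verify_orders_alt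
  by_cases hlen : served_orders.length ≠ register1.length + register2.length
  · rw [if_pos hlen, if_pos hlen]
  · rw [if_neg hlen, if_neg hlen]
    rw [Decidable.not_not] at hlen
    simpa using loopA_eq_leftovers register1 register2 served_orders 0 0
      (Nat.zero_le _) (Nat.zero_le _) (by omega)
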